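-- pv_equiv track=rewrite | github.com/Lumorti/poly | examples/test.py | sumOfPaulisAndPhasesString
-- ===== SOURCE A (Python) =====
-- def sumOfPaulisAndPhasesString(num, paulis, phases):
--
--     # Generate the combinations of paulis and phases
--     combs = []
--     for i in range(len(paulis)):
--         for k in range(len(paulis)):
--             for j in range(len(phases)):
--                 combs.append(phases[j] + " " + paulis[i] + "(x)" + paulis[k])
--
--     # Start with a blank string
--     M = ""
--
--     # If the number is 0, return the first
--     if num == 0:
--         return M + combs[0]
--
--     # Iterate over the number in ternary representation
--     while num > 0:
--         rem = num % len(combs)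
--         M = M + combs[rem]
--         num = num // len(combs)
--         if num > 0:
--             M = M + " + "
--
--     return M
-- ===== SOURCE B (Python) =====
-- def sumOfPaulisAndPhasesString(num, paulis, phases):
--     P, F = len(paulis), len(phases)
--     base = P * P * F
--
--     # the combination string for one linear index, computed directly
--     def comb(r):
--         q, j = divmod(r, F)
--         i, k = divmod(q, P)
--         return phases[j] + " " + paulis[i] + "(x)" + paulis[k]
--
--     if num == 0:
--         return comb(0)
--     if num < 0:
--         return ""
--
--     # highest power of the base not exceeding num
--     p = 1
--     while p * base <= num:
--         p *= base
--
--     # peel digits most-significant first by divmod with descending powers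
--     out = []
--     while p > 0:
--         d, num = divmod(num, p)
--         out.append(comb(d))
--         p //= base
--     return " + ".join(reversed(out))
-- ===== Notes on version B (the rewrite author's own statement) =====
-- stated objective: faster
-- what changed: B never builds the combination table: it computes each combination directly from a linear index, finds the highest power of the base not exceeding num, peels digits most-significant-first by divmod with descending powers, and reverses the collected parts at the end, instead of A's table build followed by least-significant-first mod/div accumulation.
import Mathlib
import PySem

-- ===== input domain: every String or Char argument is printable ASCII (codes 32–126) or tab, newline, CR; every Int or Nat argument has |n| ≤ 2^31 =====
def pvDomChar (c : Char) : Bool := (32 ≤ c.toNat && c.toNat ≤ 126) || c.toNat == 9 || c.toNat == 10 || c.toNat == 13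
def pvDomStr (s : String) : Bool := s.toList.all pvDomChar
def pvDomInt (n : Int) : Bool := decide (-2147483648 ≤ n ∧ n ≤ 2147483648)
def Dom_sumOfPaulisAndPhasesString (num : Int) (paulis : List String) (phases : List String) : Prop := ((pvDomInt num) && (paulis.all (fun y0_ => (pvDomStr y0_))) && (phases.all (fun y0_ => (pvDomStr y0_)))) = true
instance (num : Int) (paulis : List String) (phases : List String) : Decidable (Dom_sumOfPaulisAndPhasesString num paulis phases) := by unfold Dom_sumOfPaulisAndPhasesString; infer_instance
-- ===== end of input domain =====

-- B skips the combination table (each combination is computed from its linear index) and emits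
-- the digits most-significant-first by divmod with descending powers of the base, reversing the
-- parts at the end (objective: faster).

-- ===== PORT A =====
-- the triple nested loop building `combs`
def pvCombsA (paulis phases : List String) : List String :=
  (PySem.List.pyRange 0 (paulis.length : Int)).foldl (fun combs i =>
    (PySem.List.pyRange 0 (paulis.length : Int)).foldl (fun combs k =>
      (PySem.List.pyRange 0 (phases.length : Int)).foldl (fun combs j =>
        combs ++ [((PySem.List.pyGet? phases j).getD "") ++ " " ++
                  ((PySem.List.pyGet? paulis i).getD "") ++ "(x)" ++
                  ((PySem.List.pyGet? paulis k).getD "")]) combs) combs) []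

-- the `while num > 0` loop; fuel = num.toNat + 1 suffices since num strictly decreases
def pvLoopA : Nat → Int → List String → String → String
  | 0, _, _, M => M
  | fuel+1, num, combs, M =>
    if 0 < num then
      let rem := PySem.Int.mod num (combs.length : Int)
      let M' := M ++ ((PySem.List.pyGet? combs rem).getD "")
      let num' := PySem.Int.floordiv num (combs.length : Int)
      pvLoopA fuel num' combs (if 0 < num' then M' ++ " + " else M')
    else M

def sumOfPaulisAndPhasesString (num : Int) (paulis : List String) (phases : List String) : String :=
  let combs := pvCombsA paulis phases
  let M := ""
  if num == 0 then M ++ ((PySem.List.pyGet? combs 0).getD "")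
  else pvLoopA (num.toNat + 1) num combs M

-- ===== PORT B =====
-- comb(r): the combination for one linear index r; divmod(r, F) = (floordiv r F, mod r F)
-- (exact for F ≠ 0, which Pre_ guarantees wherever comb is reached)
def pvCombB (paulis phases : List String) (r : Int) : String :=
  let q := PySem.Int.floordiv r (phases.length : Int)
  let j := PySem.Int.mod r (phases.length : Int)
  let i := PySem.Int.floordiv q (paulis.length : Int)
  let k := PySem.Int.mod q (paulis.length : Int)
  ((PySem.List.pyGet? phases j).getD "") ++ " " ++
  ((PySem.List.pyGet? paulis i).getD "") ++ "(x)" ++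
  ((PySem.List.pyGet? paulis k).getD "")

-- `while p * base <= num: p *= base`; fuel = num.toNat + 1 suffices since p at least doubles
def pvPowB : Nat → Int → Int → Int → Int
  | 0, p, _, _ => p
  | fuel+1, p, base, num => if p * base ≤ num then pvPowB fuel (p * base) base num else p

-- `while p > 0: d, num = divmod(num, p); out.append(comb(d)); p //= base`
def pvDigitsB (paulis phases : List String) : Nat → Int → Int → Int → List String
  | 0, _, _, _ => []
  | fuel+1, num, p, base =>
    if 0 < p then
      pvCombB paulis phases (PySem.Int.floordiv num p) ::
        pvDigitsB paulis phases fuel (PySem.Int.mod num p) (PySem.Int.floordiv p base) base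
    else []

def sumOfPaulisAndPhasesString_alt (num : Int) (paulis : List String) (phases : List String) : String :=
  let base : Int := (paulis.length : Int) * (paulis.length : Int) * (phases.length : Int)
  if num == 0 then pvCombB paulis phases 0
  else if num < 0 then ""
  else
    let p := pvPowB (num.toNat + 1) 1 base num
    PySem.Str.join " + " (List.reverse (pvDigitsB paulis phases (num.toNat + 1) num p base))

-- ===== PRECONDITION & SPEC =====
-- Pre_ excludes exactly the inputs on which Python A does not return: num ≥ 0 with an empty
-- paulis/phases list (IndexError at combs[0] / ZeroDivisionError), and num > 0 with a single
-- combination P²·Φ = 1 (the while loop never terminates since num // 1 == num).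
def Pre_sumOfPaulisAndPhasesString (num : Int) (paulis : List String) (phases : List String) : Prop :=
  (0 ≤ num → paulis ≠ [] ∧ phases ≠ []) ∧
  (0 < num → 2 ≤ paulis.length * paulis.length * phases.length)

instance (num : Int) (paulis : List String) (phases : List String) : Decidable (Pre_sumOfPaulisAndPhasesString num paulis phases) := by unfold Pre_sumOfPaulisAndPhasesString; infer_instance

def pvWitness_sumOfPaulisAndPhasesString : Int × List String × List String := (5, ["I", "X"], ["+1"])

def Spec_sumOfPaulisAndPhasesString (num : Int) (paulis : List String) (phases : List String) (out : String) : Prop := out = sumOfPaulisAndPhasesString_alt num paulis phases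
instance (num : Int) (paulis : List String) (phases : List String) (out : String) : Decidable (Spec_sumOfPaulisAndPhasesString num paulis phases out) := by unfold Spec_sumOfPaulisAndPhasesString; infer_instance

-- ===== CLAIM (what is proved, stated in full; the proofs are below) =====
def Claim_equal_sumOfPaulisAndPhasesString : Prop := ∀ (num : Int) (paulis : List String) (phases : List String), Dom_sumOfPaulisAndPhasesString num paulis phases → Pre_sumOfPaulisAndPhasesString num paulis phases → Spec_sumOfPaulisAndPhasesString num paulis phases (sumOfPaulisAndPhasesString num paulis phases)

-- ===== LEMMAS AND PROOFS =====

-- the combination string for the index triple (i, k, j), on the Nat side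
def pvMk (paulis phases : List String) (i k j : Nat) : String :=
  (phases[j]?.getD "") ++ " " ++ (paulis[i]?.getD "") ++ "(x)" ++ (paulis[k]?.getD "")

lemma pvCombsA_eq (paulis phases : List String) :
    pvCombsA paulis phases =
      (List.range paulis.length).flatMap (fun i =>
        (List.range paulis.length).flatMap (fun k =>
          (List.range phases.length).map (fun j => pvMk paulis phases i k j))) := by
  unfold pvCombsA pvMk
  rw [PySem.List.pyRange_zero_natCast, PySem.List.pyRange_zero_natCast]
  simp only [List.foldl_map, PySem.List.pyGet?_natCast,
    PySem.List.foldl_append_singleton_eq_map, PySem.List.foldl_append_eq_flatMap,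
    List.nil_append]

-- indexing a flatMap over `range n` whose blocks all have length m
lemma pvGetFlat {α : Type} :
    ∀ (n : Nat) (g : Nat → List α) (m r : Nat), (∀ i, i < n → (g i).length = m) → r < n * m →
    ((List.range n).flatMap g)[r]? = (g (r / m))[r % m]? := by
  intro n
  induction n with
  | zero => intro g m r _ hr; rw [Nat.zero_mul] at hr; omega
  | succ n ih =>
    intro g m r h hr
    rw [Nat.succ_mul] at hr
    rw [List.range_succ_eq_map, List.flatMap_cons, List.flatMap_map]
    by_cases hrm : r < m
    · rw [List.getElem?_append_left (by rw [h 0 (by omega)]; exact hrm),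
        Nat.div_eq_of_lt hrm, Nat.mod_eq_of_lt hrm]
    · have hm : 0 < m := by
        rcases Nat.eq_zero_or_pos m with h0 | h0
        · rw [h0, Nat.mul_zero] at hr; omega
        · exact h0
      rw [List.getElem?_append_right (by rw [h 0 (by omega)]; omega), h 0 (by omega)]
      rw [ih (fun i => g (i + 1)) m (r - m) (fun i hi => h (i + 1) (by omega)) (by omega)]
      have e1 : r / m = (r - m) / m + 1 := by
        conv_lhs => rw [show r = (r - m) + m by omega]
        rw [Nat.add_div_right _ hm]
      have e2 : r % m = (r - m) % m := by
        conv_lhs => rw [show r = (r - m) + m by omega]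
        rw [Nat.add_mod_right]
      rw [e1, e2]

lemma pvLenInner (paulis phases : List String) (i : Nat) :
    ((List.range paulis.length).flatMap (fun k =>
      (List.range phases.length).map (fun j => pvMk paulis phases i k j))).length
    = paulis.length * phases.length := by
  rw [List.length_flatMap]
  simp [List.map_const']

lemma pvCombsA_get (paulis phases : List String) (r : Nat)
    (hr : r < paulis.length * paulis.length * phases.length) :
    (pvCombsA paulis phases)[r]? =
      some (pvMk paulis phases (r / (phases.length * paulis.length))
        (r / phases.length % paulis.length) (r % phases.length)) := by
  have hF : 0 < phases.length := by
    rcases Nat.eq_zero_or_pos phases.length with h | h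
    · rw [h] at hr; omega
    · exact h
  have hP : 0 < paulis.length := by
    rcases Nat.eq_zero_or_pos paulis.length with h | h
    · rw [h] at hr; omega
    · exact h
  rw [pvCombsA_eq]
  rw [pvGetFlat paulis.length _ (paulis.length * phases.length) r
      (fun i _ => pvLenInner paulis phases i) (by ring_nf; ring_nf at hr; omega)]
  rw [pvGetFlat paulis.length _ phases.length _
      (fun k _ => by simp) (Nat.mod_lt _ (by positivity))]
  have h1 : r % (paulis.length * phases.length) % phases.length = r % phases.length :=
    Nat.mod_mod_of_dvd r ⟨paulis.length, by ring⟩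
  have h2 : r % (paulis.length * phases.length) / phases.length = r / phases.length % paulis.length := by
    rw [Nat.mul_comm paulis.length phases.length]
    exact Nat.mod_mul_right_div_self r phases.length paulis.length
  rw [List.getElem?_map, List.getElem?_range (h1 ▸ Nat.mod_lt _ hF), Option.map_some,
    h1, h2, Nat.mul_comm phases.length paulis.length]

-- the fetched combination equals B's directly computed one
lemma pvComb_match (paulis phases : List String) (r : Int) (h0 : 0 ≤ r)
    (hr : r < (paulis.length : Int) * (paulis.length : Int) * (phases.length : Int)) :
    ((PySem.List.pyGet? (pvCombsA paulis phases) r).getD "") = pvCombB paulis phases r := by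
  obtain ⟨m, rfl⟩ : ∃ m : Nat, r = (m : Int) := ⟨r.toNat, by omega⟩
  have hm : m < paulis.length * paulis.length * phases.length := by exact_mod_cast hr
  simp only [pvCombB, PySem.Int.mod_natCast, PySem.Int.floordiv_natCast,
    PySem.List.pyGet?_natCast]
  rw [pvCombsA_get paulis phases m hm]
  unfold pvMk
  rw [Nat.div_div_eq_div_mul, Nat.mul_comm phases.length paulis.length]
  rfl

-- Str.join on an empty / nonempty parts list
lemma pvJoin_nil : PySem.Str.join " + " [] = "" := rfl

lemma pvJoin_cons (c : String) (rest : List String) :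
    PySem.Str.join " + " (c :: rest) =
      c ++ (if rest = [] then "" else " + " ++ PySem.Str.join " + " rest) := by
  rcases rest with _ | ⟨d, rest⟩
  · rw [if_pos rfl, String.append_empty, ← String.toList_inj]
    simp [PySem.Str.join, PySem.Chars.join, List.intercalate]
  · rw [if_neg (List.cons_ne_nil d rest), ← String.toList_inj]
    simp [PySem.Str.join, PySem.Chars.join, List.intercalate]

-- A's digits collected least-significant-first (proof-side list view of A's while loop)
def pvLsbInt (paulis phases : List String) : Nat → Int → Int → List String
  | 0, _, _ => []
  | fuel+1, num, base =>
    if 0 < num then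
      pvCombB paulis phases (PySem.Int.mod num base) ::
        pvLsbInt paulis phases fuel (PySem.Int.floordiv num base) base
    else []

lemma pvLsbInt_nil (paulis phases : List String) (fuel : Nat) (num base : Int)
    (h : ¬ 0 < num) : pvLsbInt paulis phases fuel num base = [] := by
  cases fuel <;> simp [pvLsbInt, h]

lemma pvLsbInt_ne_nil (paulis phases : List String) (fuel : Nat) (num base : Int)
    (hf : 0 < fuel) (h : 0 < num) : pvLsbInt paulis phases fuel num base ≠ [] := by
  cases fuel with
  | zero => omega
  | succ n => simp [pvLsbInt, h]

-- the main loop invariant: A's string accumulator equals M ++ the join of the LSB digit list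
lemma pvLoop_eq (paulis phases : List String)
    (hbig : 2 ≤ paulis.length * paulis.length * phases.length) :
    ∀ (fuel : Nat) (num : Int) (M : String), num.toNat < fuel →
    pvLoopA fuel num (pvCombsA paulis phases) M =
      M ++ PySem.Str.join " + " (pvLsbInt paulis phases fuel num
        ((paulis.length : Int) * (paulis.length : Int) * (phases.length : Int))) := by
  set b : Nat := paulis.length * paulis.length * phases.length with hbdef
  have hlen : (pvCombsA paulis phases).length = b := by
    rw [pvCombsA_eq, List.length_flatMap]
    simp [List.map_const', hbdef, Nat.mul_assoc]
  have hnb : ((paulis.length : Int) * (paulis.length : Int) * (phases.length : Int)) = (b : Int) := by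
    rw [hbdef]; push_cast; ring
  rw [hnb]
  intro fuel
  induction fuel with
  | zero => intro num M h; omega
  | succ fuel ih =>
    intro num M h
    by_cases hnum : 0 < num
    · obtain ⟨m, rfl⟩ : ∃ m : Nat, num = (m : Int) := ⟨num.toNat, by omega⟩
      have hm0 : 0 < m := by exact_mod_cast hnum
      have hmf : m < fuel + 1 := by omega
      simp only [pvLoopA, pvLsbInt, if_pos hnum]
      rw [hlen]
      have hrem := pvComb_match paulis phases (PySem.Int.mod (m : Int) (b : Int))
        (PySem.Int.mod_nonneg _ (by exact_mod_cast hbig.trans_lt' (by norm_num)))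
        (by rw [hnb, PySem.Int.mod_natCast]; exact_mod_cast Nat.mod_lt m (by omega))
      rw [hrem, PySem.Int.floordiv_natCast, PySem.Int.mod_natCast]
      have hdiv : m / b < m := Nat.div_lt_self hm0 (by omega)
      have hfuel' : ((m / b : Nat) : Int).toNat < fuel := by
        rw [Int.toNat_natCast]; omega
      rw [ih ((m / b : Nat) : Int) _ hfuel']
      rw [pvJoin_cons]
      by_cases hn2 : 0 < m / b
      · have hn2' : (0 : Int) < ((m / b : Nat) : Int) := by exact_mod_cast hn2
        rw [if_pos hn2', if_neg (pvLsbInt_ne_nil paulis phases fuel _ _ (by omega) hn2')]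
        simp [String.append_assoc]
      · have hn2' : ¬ (0 : Int) < ((m / b : Nat) : Int) := by exact_mod_cast hn2
        rw [if_neg hn2', pvLsbInt_nil paulis phases fuel _ _ hn2', pvJoin_nil, if_pos rfl]
        simp
    · rw [pvLoopA, if_neg hnum, pvLsbInt_nil paulis phases _ num _ hnum, pvJoin_nil,
        String.append_empty]

-- fixed-length LSB digit view (allows leading zeros), pure Nat
def pvLsbFix (paulis phases : List String) (b : Nat) : Nat → Nat → List String
  | _, 0 => []
  | n, j+1 => pvCombB paulis phases ((n % b : Nat) : Int) ::
      pvLsbFix paulis phases b (n / b) j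

-- splitting off the most significant digit of a fixed-length LSB list
lemma pvLsbFix_split (paulis phases : List String) (b : Nat) (_hb : 2 ≤ b) :
    ∀ (j n : Nat), n < b ^ (j+1) →
    pvLsbFix paulis phases b n (j+1) =
      pvLsbFix paulis phases b (n % b ^ j) j ++
        [pvCombB paulis phases ((n / b ^ j : Nat) : Int)] := by
  intro j
  induction j with
  | zero =>
    intro n hn
    rw [pow_one] at hn
    simp [pvLsbFix, Nat.mod_eq_of_lt hn]
  | succ j ih =>
    intro n hn
    show pvCombB paulis phases ((n % b : Nat) : Int) ::
        pvLsbFix paulis phases b (n / b) (j+1) = _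
    rw [ih (n / b) (Nat.div_lt_of_lt_mul (by rw [← pow_succ']; exact hn))]
    have h1 : (n % b ^ (j+1)) % b = n % b :=
      Nat.mod_mod_of_dvd n (dvd_pow_self b (Nat.succ_ne_zero j))
    have h2 : (n % b ^ (j+1)) / b = (n / b) % b ^ j := by
      rw [pow_succ, Nat.mul_comm]
      exact Nat.mod_mul_right_div_self n b (b ^ j)
    have h3 : n / b ^ (j+1) = (n / b) / b ^ j := by
      rw [Nat.div_div_eq_div_mul, pow_succ, Nat.mul_comm]
    show _ = pvCombB paulis phases (((n % b ^ (j+1)) % b : Nat) : Int) ::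
        (pvLsbFix paulis phases b ((n % b ^ (j+1)) / b) j ++ _)
    rw [h1, h2, h3]

lemma pvDigitsB_nil (paulis phases : List String) (fuel : Nat) (num p base : Int)
    (h : ¬ 0 < p) : pvDigitsB paulis phases fuel num p base = [] := by
  cases fuel <;> simp [pvDigitsB, h]

-- B's MSB-first digit loop produces the reverse of the fixed-length LSB list
lemma pvDigitsB_eq (paulis phases : List String) (b : Nat) (hb : 2 ≤ b) :
    ∀ (k n f : Nat), n < b ^ (k+1) → k < f →
    pvDigitsB paulis phases f (n : Int) ((b ^ k : Nat) : Int) ((b : Nat) : Int) =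
      (pvLsbFix paulis phases b n (k+1)).reverse := by
  intro k
  induction k with
  | zero =>
    intro n f hn hf
    obtain ⟨f', rfl⟩ : ∃ f', f = f' + 1 := ⟨f - 1, by omega⟩
    rw [pow_one] at hn
    show (if 0 < ((b ^ 0 : Nat) : Int) then _ else _) = _
    rw [if_pos (by simp)]
    rw [pow_zero]
    rw [show ((1 : Nat) : Int) = (1 : Int) by norm_num]
    rw [show PySem.Int.floordiv (n : Int) 1 = ((n / 1 : Nat) : Int) from
        PySem.Int.floordiv_natCast n 1,
      show PySem.Int.mod (n : Int) 1 = ((n % 1 : Nat) : Int) from PySem.Int.mod_natCast n 1,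
      show PySem.Int.floordiv (1 : Int) ((b : Nat) : Int) = ((1 / b : Nat) : Int) from
        PySem.Int.floordiv_natCast 1 b]
    rw [pvDigitsB_nil paulis phases f' _ _ _ (by
      rw [Nat.div_eq_of_lt (by omega)]; simp)]
    simp [pvLsbFix, Nat.div_one, Nat.mod_eq_of_lt hn]
  | succ k ih =>
    intro n f hn hf
    obtain ⟨f', rfl⟩ : ∃ f', f = f' + 1 := ⟨f - 1, by omega⟩
    show (if 0 < ((b ^ (k+1) : Nat) : Int) then _ else _) = _
    rw [if_pos (by positivity)]
    rw [show PySem.Int.floordiv (n : Int) ((b ^ (k+1) : Nat) : Int)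
          = ((n / b ^ (k+1) : Nat) : Int) from PySem.Int.floordiv_natCast n (b ^ (k+1)),
      show PySem.Int.mod (n : Int) ((b ^ (k+1) : Nat) : Int)
          = ((n % b ^ (k+1) : Nat) : Int) from PySem.Int.mod_natCast n (b ^ (k+1)),
      show PySem.Int.floordiv ((b ^ (k+1) : Nat) : Int) ((b : Nat) : Int)
          = ((b ^ (k+1) / b : Nat) : Int) from PySem.Int.floordiv_natCast (b ^ (k+1)) b]
    rw [show b ^ (k+1) / b = b ^ k by rw [pow_succ]; exact Nat.mul_div_cancel _ (by omega)]
    rw [ih (n % b ^ (k+1)) f' (Nat.mod_lt n (by positivity)) (by omega)]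
    rw [pvLsbFix_split paulis phases b hb (k+1) n hn]
    rw [List.reverse_append]
    rfl

-- A's LSB loop equals the fixed-length view when the leading digit is nonzero
lemma pvLsbInt_eq (paulis phases : List String) (b : Nat) (_hb : 2 ≤ b) :
    ∀ (k n f : Nat), b ^ k ≤ n → n < b ^ (k+1) → k < f →
    pvLsbInt paulis phases f (n : Int) ((b : Nat) : Int) =
      pvLsbFix paulis phases b n (k+1) := by
  intro k
  induction k with
  | zero =>
    intro n f h1 h2 hf
    obtain ⟨f', rfl⟩ : ∃ f', f = f' + 1 := ⟨f - 1, by omega⟩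
    rw [pow_zero] at h1; rw [pow_one] at h2
    show (if 0 < (n : Int) then _ else _) = _
    rw [if_pos (by exact_mod_cast h1)]
    rw [PySem.Int.mod_natCast, PySem.Int.floordiv_natCast]
    rw [pvLsbInt_nil paulis phases f' _ _ (by
      rw [Nat.div_eq_of_lt h2]; simp)]
    rfl
  | succ k ih =>
    intro n f h1 h2 hf
    obtain ⟨f', rfl⟩ : ∃ f', f = f' + 1 := ⟨f - 1, by omega⟩
    have hn0 : 0 < n := lt_of_lt_of_le (by positivity) h1
    show (if 0 < (n : Int) then _ else _) = _
    rw [if_pos (by exact_mod_cast hn0)]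
    rw [PySem.Int.mod_natCast, PySem.Int.floordiv_natCast]
    rw [ih (n / b) f'
      (by rw [Nat.le_div_iff_mul_le (by omega), ← pow_succ]; exact h1)
      (Nat.div_lt_of_lt_mul (by rw [← pow_succ']; exact h2))
      (by omega)]
    rfl

-- the power loop returns the greatest power of the base not exceeding num
lemma pvPowB_eq (b : Nat) (hb : 2 ≤ b) :
    ∀ (f j n : Nat), 1 ≤ n → b ^ j ≤ n → n < b ^ j * b ^ f →
    ∃ k, pvPowB f ((b ^ j : Nat) : Int) ((b : Nat) : Int) (n : Int) = ((b ^ k : Nat) : Int) ∧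
      b ^ k ≤ n ∧ n < b ^ (k+1) := by
  intro f
  induction f with
  | zero => intro j n _ h1 h2; rw [pow_zero, Nat.mul_one] at h2; omega
  | succ f ih =>
    intro j n hn h1 h2
    simp only [pvPowB]
    by_cases hc : b ^ j * b ≤ n
    · rw [if_pos (by exact_mod_cast hc)]
      have hcast : ((b ^ j : Nat) : Int) * ((b : Nat) : Int) = ((b ^ (j+1) : Nat) : Int) := by
        push_cast [pow_succ]; ring
      rw [hcast]
      refine ih (j+1) n hn (by rw [pow_succ]; exact hc) ?_
      calc n < b ^ j * b ^ (f+1) := h2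
        _ = b ^ (j+1) * b ^ f := by ring
    · rw [if_neg (by exact_mod_cast hc)]
      exact ⟨j, rfl, h1, by rw [pow_succ]; omega⟩

-- ===== VERDICT (by name: the statement is the Claim_ definition above) =====
theorem sumOfPaulisAndPhasesString_spec : Claim_equal_sumOfPaulisAndPhasesString := by
  intro num paulis phases _ hpre
  unfold Spec_sumOfPaulisAndPhasesString sumOfPaulisAndPhasesString sumOfPaulisAndPhasesString_alt
  obtain ⟨hne, hbig⟩ := hpre
  by_cases h0 : num = 0
  · subst h0
    simp only [beq_self_eq_true, if_true]
    obtain ⟨hp, hf⟩ := hne le_rfl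
    have hP : 0 < paulis.length := List.length_pos_of_ne_nil hp
    have hF : 0 < phases.length := List.length_pos_of_ne_nil hf
    rw [String.empty_append]
    exact pvComb_match paulis phases 0 le_rfl (by positivity)
  · simp only [if_neg (by simpa using h0), beq_iff_eq]
    by_cases hpos : 0 < num
    · rw [if_neg (by omega)]
      obtain ⟨m, rfl⟩ : ∃ m : Nat, num = (m : Int) := ⟨num.toNat, by omega⟩
      have hm0 : 0 < m := by exact_mod_cast hpos
      set b : Nat := paulis.length * paulis.length * phases.length with hbdef
      have hb : 2 ≤ b := hbig hpos
      have hnb : ((paulis.length : Int) * (paulis.length : Int) * (phases.length : Int)) = ((b : Nat) : Int) := by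
        rw [hbdef]; push_cast; ring
      rw [Int.toNat_natCast]
      -- the power loop
      have hlt : m < b ^ 0 * b ^ (m+1) := by
        rw [pow_zero, Nat.one_mul]
        calc m < 2 ^ (m+1) := by
              calc m < 2 ^ m := Nat.lt_two_pow_self
                _ ≤ 2 ^ (m+1) := Nat.pow_le_pow_right (by omega) (by omega)
          _ ≤ b ^ (m+1) := Nat.pow_le_pow_left hb (m+1)
      obtain ⟨k, hpow, hk1, hk2⟩ := pvPowB_eq b hb (m+1) 0 m hm0 (by rw [pow_zero]; omega) hlt
      have hkm : k < m + 1 := by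
        have : k < 2 ^ k := Nat.lt_two_pow_self
        have : 2 ^ k ≤ b ^ k := Nat.pow_le_pow_left hb k
        omega
      rw [pvLoop_eq paulis phases hb (m+1) (m : Int) "" (by rw [Int.toNat_natCast]; omega)]
      rw [hnb]
      rw [show ((b ^ 0 : Nat) : Int) = (1 : Int) by norm_num] at hpow
      rw [hpow]
      rw [pvDigitsB_eq paulis phases b hb k m (m+1) hk2 hkm]
      rw [List.reverse_reverse]
      rw [pvLsbInt_eq paulis phases b hb k m (m+1) hk1 hk2 hkm]
      rw [String.empty_append]
    · rw [if_pos (by omega)]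
      have h1 : num.toNat + 1 = 1 := by omega
      rw [h1]
      rw [pvLoopA, if_neg hpos]
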